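-- pv_equiv track=rewrite | github.com/Mahi08888/AI_UNIT_QA- | ai_files/BFS.py | bfs
-- ===== SOURCE A (Python) =====
-- from collections import deque
--
-- def is_valid(state):
--
--     for peg in state:
--         if list(peg) != sorted(peg, reverse=True):
--             return False
--     return True
--
-- def bfs(start, goal):
--     queue = deque([(start, [start])])
--     visited = set([start])
--
--     moves = [(0,1), (0,2), (1,0), (1,2), (2,0), (2,1)]
--
--     while queue:
--         state, path = queue.popleft()
--
--         if state == goal:
--             return path
--
--         for s, d in moves:
--             new_state = [list(peg) for peg in state]
--
--             if new_state[s]: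
--                 disk = new_state[s].pop()
--
--                 if not new_state[d] or new_state[d][-1] > disk:
--                     new_state[d].append(disk)
--
--                     new_tuple = tuple(tuple(peg) for peg in new_state)
--
--                     if new_tuple not in visited and is_valid(new_tuple):
--                         visited.add(new_tuple)
--                         queue.append((new_tuple, path + [new_tuple]))
--
--     return None
-- ===== SOURCE B (Python) =====
-- from collections import deque
--
-- def bfs(start, goal):
--     # parent-pointer BFS: queue of plain states + parent dict; successors generated
--     # by a comprehension over moves; path reconstructed once at the goal
--     moves = [(0, 1), (0, 2), (1, 0), (1, 2), (2, 0), (2, 1)]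
--     parent = {start: None}
--     queue = deque([start])
--
--     while queue:
--         state = queue.popleft()
--
--         if state == goal:
--             path = []
--             cur = state
--             while cur is not None:
--                 path.append(cur)
--                 cur = parent[cur]
--             path.reverse()
--             return path
--
--         candidates = [
--             tuple(state[s][:-1] if i == s else state[d] + (state[s][-1],) if i == d else peg
--                   for i, peg in enumerate(state))
--             for s, d in moves
--             if state[s] and (not state[d] or state[d][-1] > state[s][-1])
--         ]
--         for nt in candidates:
--             if nt not in parent and all(
--                 all(peg[j + 1] <= peg[j] for j in range(len(peg) - 1)) for peg in nt
--             ):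
--                 parent[nt] = state
--                 queue.append(nt)
--
--     return None
-- ===== Notes on version B (the rewrite author's own statement) =====
-- stated objective: alternative
-- what changed: BFS queue entries carry only the state; a parent-pointer dict replaces both the visited set and the per-entry path copies, the path is reconstructed once by walking parents from the goal and reversing, successors are produced by a filtering comprehension over the move list with tuple slicing instead of list-copy/pop/append, and peg validity is an adjacent-pairwise check instead of comparing against a sort.
import Mathlib
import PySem

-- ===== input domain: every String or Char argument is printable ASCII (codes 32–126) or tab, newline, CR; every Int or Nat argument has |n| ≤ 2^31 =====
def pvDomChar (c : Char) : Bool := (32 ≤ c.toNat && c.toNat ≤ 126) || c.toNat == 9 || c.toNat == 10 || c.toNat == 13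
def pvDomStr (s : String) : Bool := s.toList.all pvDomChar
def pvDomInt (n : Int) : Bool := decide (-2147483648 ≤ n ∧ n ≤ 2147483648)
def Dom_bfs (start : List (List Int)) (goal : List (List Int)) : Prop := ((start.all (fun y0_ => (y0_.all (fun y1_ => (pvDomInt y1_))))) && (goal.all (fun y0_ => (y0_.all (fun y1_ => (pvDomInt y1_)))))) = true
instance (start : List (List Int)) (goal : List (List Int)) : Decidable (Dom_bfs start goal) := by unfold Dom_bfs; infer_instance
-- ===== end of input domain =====

-- One honest line: B replaces A's (state, full-path) queue entries by a state queue plus a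
-- parent-pointer dict (also serving as the visited set), rebuilding the path only at the goal;
-- successors come from a filtering comprehension with tuple slicing and validity from an
-- adjacent-pairwise check instead of a sort.

-- fuel bound shared by both ports as a totality guard for the BFS loop (reached states are
-- rearrangements of start's disks over start.length pegs, far fewer than (n+1)^(n+L))
def pvFuel (start : List (List Int)) : Nat :=
  let n := start.flatten.length
  7 * (n + 1) ^ (n + start.length) + 7

-- ===== PORT A =====
def isValidA (state : List (List Int)) : Bool :=
  state.all (fun peg => peg == PySem.List.sorted peg (fun x => x) true)

def movesA : List (Int × Int) := [(0, 1), (0, 2), (1, 0), (1, 2), (2, 0), (2, 1)]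

def stepA (state : List (List Int)) (path : List (List (List Int)))
    (acc : List (List (List Int) × List (List (List Int))) × List (List (List Int)))
    (m : Int × Int) :
    List (List (List Int) × List (List (List Int))) × List (List (List Int)) :=
  match PySem.List.pyGet? state m.1 with
  | none => acc                                    -- IndexError guard (outside Pre_)
  | some pegS =>
    if pegS.isEmpty then acc
    else
      match PySem.List.pop? pegS (-1) with         -- disk = new_state[s].pop()
      | none => acc
      | some (disk, popped) =>
        let state1 := PySem.List.pySetD state m.1 popped
        match PySem.List.pyGet? state1 m.2 with
        | none => acc                              -- IndexError guard (outside Pre_)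
        | some pegD =>
          if pegD.isEmpty || decide (disk < PySem.List.pyGetD pegD (-1) 0) then
            let nt := PySem.List.pySetD state1 m.2 (pegD ++ [disk])
            if !acc.2.contains nt && isValidA nt then
              (acc.1 ++ [(nt, path ++ [nt])], PySem.Set.add acc.2 nt)
            else acc
          else acc

def loopA (goal : List (List Int)) :
    Nat → List (List (List Int) × List (List (List Int))) → List (List (List Int)) →
    Option (List (List (List Int)))
  | 0, _, _ => none
  | _ + 1, [], _ => none
  | fuel + 1, (state, path) :: rest, visited =>
    if state == goal then some path
    else
      let r := movesA.foldl (stepA state path) (rest, visited)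
      loopA goal fuel r.1 r.2

def bfs (start : List (List Int)) (goal : List (List Int)) : Option (List (List (List Int))) :=
  loopA goal (pvFuel start) [(start, [start])] (PySem.Set.ofList [start])

-- ===== PORT B =====
def validPegsB (state : List (List Int)) : Bool :=
  state.all (fun peg =>
    (List.range (peg.length - 1)).all (fun j => decide (peg.getD (j + 1) 0 ≤ peg.getD j 0)))

def movesB : List (Int × Int) := [(0, 1), (0, 2), (1, 0), (1, 2), (2, 0), (2, 1)]

-- one comprehension item: 'tuple(… for i, peg in enumerate(state)) for s, d in moves if …'
def moveB (state : List (List Int)) (m : Int × Int) : Option (List (List Int)) :=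
  match PySem.List.pyGet? state m.1, PySem.List.pyGet? state m.2 with
  | some src, some dst =>
    if src.isEmpty then none                       -- filtered out: 'if state[s]'
    else
      match PySem.List.pyGet? src (-1) with        -- state[s][-1]
      | none => none
      | some disk =>
        if dst.isEmpty || decide (disk < PySem.List.pyGetD dst (-1) 0) then
          some ((PySem.List.enumerate state).map (fun ip =>
            if ip.1 == m.1 then PySem.List.slice src none (some (-1))
            else if ip.1 == m.2 then dst ++ [disk] else ip.2))
        else none
  | _, _ => none                                   -- IndexError guard (outside Pre_)

-- 'if nt not in parent and all(…): parent[nt] = state; queue.append(nt)'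
def insB (state : List (List Int))
    (acc : List (List (List Int)) × PySem.Dict (List (List Int)) (Option (List (List Int))))
    (nt : List (List Int)) :
    List (List (List Int)) × PySem.Dict (List (List Int)) (Option (List (List Int))) :=
  if !acc.2.contains nt && validPegsB nt then (acc.1 ++ [nt], acc.2.insert nt (some state))
  else acc

-- path.append(cur); cur = parent[cur]  — fuel-guarded walk up the parent chain, then reversed
def rebuildB (parent : PySem.Dict (List (List Int)) (Option (List (List Int)))) :
    Nat → Option (List (List Int)) → List (List (List Int)) → List (List (List Int))
  | _, none, rev => rev.reverse
  | 0, some _, rev => rev.reverse                  -- fuel guard (never reached)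
  | fuel + 1, some c, rev =>
    match parent.get? c with
    | none => rev.reverse                          -- KeyError guard (never reached)
    | some pr => rebuildB parent fuel pr (rev ++ [c])

def loopB (goal : List (List Int)) :
    Nat → List (List (List Int)) → PySem.Dict (List (List Int)) (Option (List (List Int))) →
    Option (List (List (List Int)))
  | 0, _, _ => none
  | _ + 1, [], _ => none
  | fuel + 1, state :: rest, parent =>
    if state == goal then some (rebuildB parent (parent.size + 1) (some state) [])
    else
      let r := (movesB.filterMap (moveB state)).foldl (insB state) (rest, parent)
      loopB goal fuel r.1 r.2

def bfs_alt (start : List (List Int)) (goal : List (List Int)) : Option (List (List (List Int))) :=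
  loopB goal (pvFuel start) [start] (PySem.Dict.empty.insert start none)

-- ===== PRECONDITION & SPEC =====
-- Pre_ excludes exactly the inputs where start ≠ goal and start has fewer than 3 pegs:
-- there A (and B alike) raises IndexError on new_state[2].
def Pre_bfs (start : List (List Int)) (goal : List (List Int)) : Prop :=
  start = goal ∨ 3 ≤ start.length
instance (start : List (List Int)) (goal : List (List Int)) : Decidable (Pre_bfs start goal) := by
  unfold Pre_bfs; infer_instance

def pvWitness_bfs : List (List Int) × List (List Int) :=
  ([[2, 1], [], []], [[], [], [2, 1]])

def Spec_bfs (start : List (List Int)) (goal : List (List Int)) (out : Option (List (List (List Int)))) : Prop := out = bfs_alt start goal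
instance (start : List (List Int)) (goal : List (List Int)) (out : Option (List (List (List Int)))) : Decidable (Spec_bfs start goal out) := by unfold Spec_bfs; infer_instance

-- ===== CLAIM (what is proved, stated in full; the proofs are below) =====
def Claim_equal_bfs : Prop := ∀ (start : List (List Int)) (goal : List (List Int)), Dom_bfs start goal → Pre_bfs start goal → Spec_bfs start goal (bfs start goal)

-- ===== LEMMAS AND PROOFS =====

-- parent chain from start to st spells exactly the path p
inductive ChainP (parent : PySem.Dict (List (List Int)) (Option (List (List Int)))) :
    List (List Int) → List (List (List Int)) → Prop
  | root (st : List (List Int)) (h : parent.get? st = some none) : ChainP parent st [st]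
  | step (st prev : List (List Int)) (p : List (List (List Int)))
      (h : parent.get? st = some (some prev)) (hc : ChainP parent prev p) :
      ChainP parent st (p ++ [st])

theorem chainP_subset {parent : PySem.Dict (List (List Int)) (Option (List (List Int)))}
    {st : List (List Int)} {p : List (List (List Int))} (hc : ChainP parent st p) :
    ∀ x ∈ p, x ∈ parent.keys := by
  induction hc with
  | root y h =>
    intro x hx; simp at hx; subst hx
    have hne : parent.get? x ≠ none := by simp [h]
    rwa [Ne, PySem.Dict.get?_eq_none_iff_not_mem_keys, not_not] at hne
  | step y prev q h hcq ih =>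
    intro x hx
    rcases List.mem_append.1 hx with hx | hx
    · exact ih x hx
    · simp at hx; subst hx
      have hne : parent.get? x ≠ none := by simp [h]
      rwa [Ne, PySem.Dict.get?_eq_none_iff_not_mem_keys, not_not] at hne

theorem chainP_insert_fresh {parent : PySem.Dict (List (List Int)) (Option (List (List Int)))}
    {st k : List (List Int)} {p : List (List (List Int))} {v : Option (List (List Int))}
    (hk : k ∉ parent.keys) (hc : ChainP parent st p) :
    ChainP (parent.insert k v) st p := by
  induction hc with
  | root st h =>
    refine ChainP.root st ?_
    rw [PySem.Dict.get?_insert_of_ne, h]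
    intro he; subst he
    exact hk (chainP_subset (ChainP.root st h) st (by simp))
  | step st prev p h hc ih =>
    refine ChainP.step st prev p ?_ ih
    rw [PySem.Dict.get?_insert_of_ne, h]
    intro he; subst he
    exact hk (chainP_subset (ChainP.step st prev p h hc) st (by simp))

theorem rebuildB_chain {parent : PySem.Dict (List (List Int)) (Option (List (List Int)))}
    {st : List (List Int)} {p : List (List (List Int))} (hc : ChainP parent st p) :
    ∀ (fuel : Nat) (rev : List (List (List Int))), p.length ≤ fuel →
      rebuildB parent fuel (some st) rev = (rev ++ p.reverse).reverse := by
  induction hc with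
  | root st h =>
    intro fuel rev hf
    cases fuel with
    | zero => simp at hf
    | succ f => simp [rebuildB, h]
  | step st prev p h hc ih =>
    intro fuel rev hf
    cases fuel with
    | zero => simp at hf
    | succ f =>
      have hl : p.length ≤ f := by simp at hf; omega
      simp only [rebuildB, h]
      rw [ih f (rev ++ [st]) hl]
      simp

-- the full simulation invariant between A's loop state and B's loop state
def LoopInv (qa : List (List (List Int) × List (List (List Int))))
    (qb : List (List (List Int)))
    (visited : List (List (List Int)))
    (parent : PySem.Dict (List (List Int)) (Option (List (List Int)))) : Prop :=
  qb = qa.map Prod.fst ∧ visited = parent.keys ∧ parent.keys.Nodup ∧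
    ∀ e ∈ qa, ChainP parent e.1 e.2 ∧ e.2.Nodup

theorem valid_eq (st : List (List Int)) : isValidA st = validPegsB st := by
  unfold isValidA validPegsB
  congr 1; funext peg
  have hiff : peg = PySem.List.sorted peg (fun x => x) true ↔
      peg.Pairwise (fun a b : Int => b ≤ a) := by
    constructor
    · intro h
      have := PySem.List.sorted_pairwise_rev (xs := peg) (key := fun x => x)
      rw [← h] at this
      simpa using this
    · intro h
      exact (PySem.List.sorted_rev_eq_self_of_pairwise peg (fun x => x) (by simpa using h)).symm
  have hiff2 : peg.Pairwise (fun a b : Int => b ≤ a) ↔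
      ∀ j ∈ List.range (peg.length - 1), peg.getD (j + 1) 0 ≤ peg.getD j 0 := by
    haveI : Trans (fun a b : Int => b ≤ a) (fun a b : Int => b ≤ a) (fun a b : Int => b ≤ a) :=
      ⟨fun h1 h2 => le_trans h2 h1⟩
    rw [← List.isChain_iff_pairwise, List.isChain_iff_getElem]
    constructor
    · intro h j hj
      rw [List.mem_range] at hj
      have hj1 : j + 1 < peg.length := by omega
      rw [List.getD_eq_getElem peg 0 hj1, List.getD_eq_getElem peg 0 (by omega)]
      exact h j (by omega)
    · intro h j hj
      have := h j (List.mem_range.2 (by omega))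
      rwa [List.getD_eq_getElem peg 0 (by omega), List.getD_eq_getElem peg 0 (by omega)] at this
  rw [Bool.eq_iff_iff]
  simp only [beq_iff_eq, List.all_eq_true, decide_eq_true_eq]
  rw [hiff, hiff2]

-- B's enumerate-map successor equals A's double set
theorem enumMap_set_set (state : List (List Int)) (s d : Nat) (X Y : List Int)
    (hs : s < state.length) (hd : d < state.length) (hsd : s ≠ d) :
    (PySem.List.enumerate state).map (fun ip =>
      if ip.1 == (s : Int) then X else if ip.1 == (d : Int) then Y else ip.2)
      = (state.set s X).set d Y := by
  apply List.ext_getElem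
  · simp [PySem.List.length_enumerate]
  · intro i hi1 hi2
    have hil : i < state.length := by
      simpa [PySem.List.length_enumerate] using hi1
    rw [List.getElem_map]
    rw [PySem.List.getElem_enumerate]
    simp only [zero_add]
    rw [List.getElem_set, List.getElem_set]
    by_cases his : i = s
    · subst his
      have hd1 : ¬ d = i := fun h => hsd h.symm
      simp [hd1]
    · by_cases hid : i = d
      · subst hid
        have h1 : ¬ ((i : Int) == (s : Int)) = true := by simp; omega
        simp [h1]
      · have h1 : ¬ ((i : Int) == (s : Int)) = true := by simp; omega
        have h2 : ¬ ((i : Int) == (d : Int)) = true := by simp; omega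
        have hd1 : ¬ d = i := fun h => hid h.symm
        have hs1 : ¬ s = i := fun h => his h.symm
        simp [h1, h2, hd1, hs1]

-- foldl over a filterMap'd list as a foldl over the source list
theorem foldl_filterMap_eq {α β γ : Type} (f : α → Option β) (g : γ → β → γ)
    (l : List α) (init : γ) :
    (l.filterMap f).foldl g init
      = l.foldl (fun c a => match f a with | none => c | some b => g c b) init := by
  induction l generalizing init with
  | nil => rfl
  | cons a t ih =>
    cases hfa : f a <;> simp [hfa, ih]

theorem step_sim (s d : Nat) (hsd : s ≠ d) (state : List (List Int))
    (p : List (List (List Int)))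
    (qa : List (List (List Int) × List (List (List Int))))
    (qb : List (List (List Int)))
    (visited : List (List (List Int)))
    (parent : PySem.Dict (List (List Int)) (Option (List (List Int))))
    (hInv : LoopInv qa qb visited parent)
    (hc : ChainP parent state p) (hnd : p.Nodup) :
    (LoopInv (stepA state p (qa, visited) ((s : Int), (d : Int))).1
      ((match moveB state ((s : Int), (d : Int)) with
        | none => (qb, parent)
        | some nt => insB state (qb, parent) nt)).1
      (stepA state p (qa, visited) ((s : Int), (d : Int))).2
      ((match moveB state ((s : Int), (d : Int)) with
        | none => (qb, parent)
        | some nt => insB state (qb, parent) nt)).2) ∧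
    ChainP ((match moveB state ((s : Int), (d : Int)) with
        | none => (qb, parent)
        | some nt => insB state (qb, parent) nt)).2 state p := by
  obtain ⟨hq, hv, hnd2, hent⟩ := hInv
  unfold stepA moveB
  simp only [PySem.List.pyGet?_natCast, PySem.List.pySetD_natCast]
  cases hS : state[s]? with
  | none => exact ⟨⟨hq, hv, hnd2, hent⟩, hc⟩
  | some src =>
    cases hD : state[d]? with
    | none =>
      rcases List.eq_nil_or_concat src with rfl | ⟨ys, y, rfl⟩
      · simp only [List.isEmpty_nil, if_true]
        exact ⟨⟨hq, hv, hnd2, hent⟩, hc⟩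
      · have hne : (ys ++ [y]).isEmpty = false := by simp
        simp only [List.concat_eq_append, hne, Bool.false_eq_true, if_false, PySem.List.pop?_last,
          List.getElem?_set_ne hsd, hD]
        exact ⟨⟨hq, hv, hnd2, hent⟩, hc⟩
    | some dst =>
      rcases List.eq_nil_or_concat src with rfl | ⟨ys, y, rfl⟩
      · simp only [List.isEmpty_nil, if_true]
        exact ⟨⟨hq, hv, hnd2, hent⟩, hc⟩
      · have hne : (ys ++ [y]).isEmpty = false := by simp
        simp only [List.concat_eq_append, hne, Bool.false_eq_true, if_false, PySem.List.pop?_last,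
          PySem.List.pyGet?_neg_one_append_singleton, PySem.List.slice_to_neg_one,
          List.dropLast_concat, List.getElem?_set_ne hsd, hD]
        by_cases hcond : (dst.isEmpty || decide (y < PySem.List.pyGetD dst (-1) 0)) = true
        · simp only [hcond, if_true]
          have hsl : s < state.length := (List.getElem?_eq_some_iff.1 hS).1
          have hdl : d < state.length := (List.getElem?_eq_some_iff.1 hD).1
          rw [enumMap_set_set state s d ys (dst ++ [y]) hsl hdl hsd]
          unfold insB
          set nt := (state.set s ys).set d (dst ++ [y]) with hnt
          have hcont : visited.contains nt = parent.contains nt := by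
            subst hv
            rw [PySem.Dict.contains_eq_decide_mem_keys]
            simp
          rw [hcont, valid_eq]
          by_cases hpush : (!parent.contains nt && validPegsB nt) = true
          · simp only [hpush, if_true]
            have hfresh : nt ∉ parent.keys := by
              have : parent.contains nt = false := by
                cases hct : parent.contains nt
                · rfl
                · rw [hct] at hpush; simp at hpush
              rw [PySem.Dict.contains_eq_decide_mem_keys] at this
              simpa using this
            have hcontf : parent.contains nt = false := by
              rw [PySem.Dict.contains_eq_decide_mem_keys]; simpa using hfresh
            refine ⟨⟨by simp [hq], ?_, ?_, ?_⟩, chainP_insert_fresh hfresh hc⟩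
            · rw [PySem.Dict.keys_insert_of_not_contains _ _ hcontf]
              subst hv
              show PySem.Set.add parent.keys nt = parent.keys ++ [nt]
              unfold PySem.Set.add
              rw [if_neg]
              intro hcn
              exact hfresh (by simpa [PySem.Set.contains, List.contains_iff_exists_mem_beq] using hcn)
            · exact PySem.Dict.nodup_keys_insert _ _ _ hnd2
            · intro e he
              rcases List.mem_append.1 he with he | he
              · exact ⟨chainP_insert_fresh hfresh (hent e he).1, (hent e he).2⟩
              · simp at he; subst he
                refine ⟨ChainP.step nt state p (PySem.Dict.get?_insert_self _ _ _)
                  (chainP_insert_fresh hfresh hc), ?_⟩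
                have hnp : nt ∉ p := fun hmem => hfresh (chainP_subset hc nt hmem)
                rw [List.nodup_append]
                refine ⟨hnd, List.nodup_singleton nt, ?_⟩
                intro a ha b hb
                have hbe : b = nt := by simpa using hb
                subst hbe
                exact fun hae => hnp (hae ▸ ha)
          · simp only [hpush, Bool.false_eq_true, if_false]
            exact ⟨⟨hq, hv, hnd2, hent⟩, hc⟩
        · simp only [hcond, Bool.false_eq_true, if_false]
          exact ⟨⟨hq, hv, hnd2, hent⟩, hc⟩

theorem fold_sim (ms : List (Int × Int))
    (hm : ∀ m ∈ ms, ∃ (s d : Nat), m = ((s : Int), (d : Int)) ∧ s ≠ d)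
    (state : List (List Int)) (p : List (List (List Int)))
    (qa : List (List (List Int) × List (List (List Int))))
    (qb : List (List (List Int)))
    (visited : List (List (List Int)))
    (parent : PySem.Dict (List (List Int)) (Option (List (List Int))))
    (hInv : LoopInv qa qb visited parent)
    (hc : ChainP parent state p) (hnd : p.Nodup) :
    LoopInv (ms.foldl (stepA state p) (qa, visited)).1
      ((ms.filterMap (moveB state)).foldl (insB state) (qb, parent)).1
      (ms.foldl (stepA state p) (qa, visited)).2
      ((ms.filterMap (moveB state)).foldl (insB state) (qb, parent)).2 := by
  rw [foldl_filterMap_eq]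
  induction ms generalizing qa qb visited parent with
  | nil => exact hInv
  | cons m t ih =>
    obtain ⟨s, d, hm1, hsd⟩ := hm m (by simp)
    subst hm1
    obtain ⟨h1, h2⟩ := step_sim s d hsd state p qa qb visited parent hInv hc hnd
    simp only [List.foldl_cons]
    cases hmv : moveB state ((s : Int), (d : Int)) with
    | none =>
      simp only [hmv] at h1 h2
      exact ih (fun m hm' => hm m (by simp [hm'])) _ _ _ _ h1 h2
    | some nt =>
      simp only [hmv] at h1 h2
      exact ih (fun m hm' => hm m (by simp [hm'])) _ _ _ _ h1 h2

theorem movesB_eq : movesB = movesA := rfl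

theorem movesA_shape : ∀ m ∈ movesA, ∃ (s d : Nat), m = ((s : Int), (d : Int)) ∧ s ≠ d := by
  intro m hm
  simp only [movesA, List.mem_cons, List.not_mem_nil, or_false] at hm
  rcases hm with rfl | rfl | rfl | rfl | rfl | rfl
  · exact ⟨0, 1, by norm_num, by omega⟩
  · exact ⟨0, 2, by norm_num, by omega⟩
  · exact ⟨1, 0, by norm_num, by omega⟩
  · exact ⟨1, 2, by norm_num, by omega⟩
  · exact ⟨2, 0, by norm_num, by omega⟩
  · exact ⟨2, 1, by norm_num, by omega⟩

theorem keys_length_eq_size (parent : PySem.Dict (List (List Int)) (Option (List (List Int)))) :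
    parent.keys.length = parent.size := by
  simp [PySem.Dict.keys, PySem.Dict.size]

theorem loop_sim (goal : List (List Int)) (fuel : Nat)
    (qa : List (List (List Int) × List (List (List Int))))
    (qb : List (List (List Int)))
    (visited : List (List (List Int)))
    (parent : PySem.Dict (List (List Int)) (Option (List (List Int))))
    (hInv : LoopInv qa qb visited parent) :
    loopA goal fuel qa visited = loopB goal fuel qb parent := by
  induction fuel generalizing qa qb visited parent with
  | zero => simp [loopA, loopB]
  | succ f ih =>
    obtain ⟨hq, hv, hnd, hent⟩ := hInv
    cases qa with
    | nil => subst hq; simp [loopA, loopB]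
    | cons e ta =>
      obtain ⟨st, p⟩ := e
      subst hq
      obtain ⟨hcp, hndp⟩ := hent (st, p) (by simp)
      simp only [List.map_cons, loopA, loopB]
      by_cases hg : st == goal
      · simp only [hg, if_true]
        have hsub : p ⊆ parent.keys := fun x hx => chainP_subset hcp x hx
        have hlen : p.length ≤ parent.size + 1 := by
          have h2 := (List.subperm_of_subset (show p.Nodup from hndp) hsub).length_le
          rw [keys_length_eq_size] at h2
          omega
        rw [rebuildB_chain hcp (parent.size + 1) [] hlen]
        simp
      · simp only [hg, Bool.false_eq_true, if_false, movesB_eq]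
        apply ih
        have := fold_sim movesA movesA_shape st p ta (ta.map Prod.fst) visited parent
          ⟨rfl, hv, hnd, fun e he => hent e (by simp [he])⟩ hcp hndp
        exact this

-- ===== VERDICT (by name: the statement is the Claim_ definition above) =====
theorem bfs_spec : Claim_equal_bfs := by
  intro start goal _ _
  unfold Spec_bfs bfs bfs_alt
  apply loop_sim
  refine ⟨by simp, ?_, ?_, ?_⟩
  · rw [PySem.Dict.keys_insert_of_not_contains _ _ (by simp)]
    simp [PySem.Set.ofList]
  · exact PySem.Dict.nodup_keys_insert _ _ _ (by simp)
  · intro e he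
    simp at he; subst he
    exact ⟨ChainP.root start (PySem.Dict.get?_insert_self _ _ _), by simp⟩
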